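-- pv_equiv track=rewrite | github.com/qiboteam/qibolab | src/qibolab/transpilers/raw_code.py | map_list
-- ===== SOURCE A (Python) =====
-- def map_list(path):
--     keys = path
--     path_ends = [path[0]] + [path[-1]]
--     path_middle = path[1:-1]
--     List = []
--     for i in range(len(path) - 1):
--         values = path_middle[:i] + path_ends + path_middle[i:]
--         mapping = {keys[i]: values[i] for i in range(len(keys))}
--         List.append(mapping)
--     return List
-- ===== SOURCE B (Python) =====
-- def map_list(path):
--     first = path[0]
--     last = path[-1]
--     n = len(path)
--     result = []
--     for i in range(n - 1):
--         mapping = {}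
--         for j, key in enumerate(path):
--             if j == i:
--                 v = first
--             elif j == i + 1:
--                 v = last
--             elif j < i:
--                 v = path[j + 1]
--             else:
--                 v = path[j - 1]
--             mapping[key] = v
--         result.append(mapping)
--     return result
-- ===== Notes on version B (the rewrite author's own statement) =====
-- stated objective: alternative
-- what changed: B computes each mapping's value directly from path by a per-index case split (j==i -> first, j==i+1 -> last, j<i -> path[j+1], else path[j-1]) instead of materialising a sliced-and-concatenated 'values' list per iteration.
import Mathlib
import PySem

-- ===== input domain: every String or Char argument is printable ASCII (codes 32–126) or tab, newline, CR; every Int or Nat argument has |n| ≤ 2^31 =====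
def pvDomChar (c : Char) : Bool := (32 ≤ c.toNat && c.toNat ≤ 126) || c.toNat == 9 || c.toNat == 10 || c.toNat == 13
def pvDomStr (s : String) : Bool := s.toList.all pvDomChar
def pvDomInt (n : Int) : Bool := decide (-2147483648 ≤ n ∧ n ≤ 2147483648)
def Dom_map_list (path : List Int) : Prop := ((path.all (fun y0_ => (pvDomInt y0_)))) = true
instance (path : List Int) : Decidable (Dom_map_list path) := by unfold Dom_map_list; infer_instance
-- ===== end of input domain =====

-- B rebuilds each mapping by a per-index case split on the key's position instead of
-- slicing and concatenating a fresh 'values' list per iteration (objective: alternative).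

-- ===== PORT A =====
def map_list (path : List Int) : List (List (Int × Int)) :=
  let keys := path
  let pathEnds := [PySem.List.pyGetD path 0 0] ++ [PySem.List.pyGetD path (-1) 0]
  let pathMiddle := PySem.List.slice path (some 1) (some (-1))
  (PySem.List.pyRange 0 ((path.length : Int) - 1) 1).foldl (fun acc i =>
    let values := PySem.List.slice pathMiddle none (some i) ++ pathEnds ++
                  PySem.List.slice pathMiddle (some i) none
    let mapping := (PySem.List.pyRange 0 (keys.length : Int) 1).foldl
      (fun d j => d.insert (PySem.List.pyGetD keys j 0) (PySem.List.pyGetD values j 0))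
      PySem.Dict.empty
    acc ++ [mapping.items]) []

-- ===== PORT B =====
def map_list_alt (path : List Int) : List (List (Int × Int)) :=
  let first := PySem.List.pyGetD path 0 0
  let last := PySem.List.pyGetD path (-1) 0
  let n : Int := path.length
  (PySem.List.pyRange 0 (n - 1) 1).foldl (fun acc i =>
    let mapping := (PySem.List.enumerate path 0).foldl (fun d p =>
      let v := if p.1 = i then first
               else if p.1 = i + 1 then last
               else if p.1 < i then PySem.List.pyGetD path (p.1 + 1) 0
               else PySem.List.pyGetD path (p.1 - 1) 0
      d.insert p.2 v) PySem.Dict.empty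
    acc ++ [mapping.items]) []

-- ===== PRECONDITION & SPEC =====
-- A raises IndexError on the empty list (path[0]); B raises there too.
def Pre_map_list (path : List Int) : Prop := path ≠ []
instance (path : List Int) : Decidable (Pre_map_list path) := by unfold Pre_map_list; infer_instance
def pvWitness_map_list : List Int := [1, 2, 3]

def Spec_map_list (path : List Int) (out : List (List (Int × Int))) : Prop := out = map_list_alt path
instance (path : List Int) (out : List (List (Int × Int))) : Decidable (Spec_map_list path out) := by unfold Spec_map_list; infer_instance

-- ===== CLAIM (what is proved, stated in full; the proofs are below) =====
def Claim_equal_map_list : Prop := ∀ (path : List Int), Dom_map_list path → Pre_map_list path → Spec_map_list path (map_list path)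



-- ===== LEMMAS AND PROOFS =====

-- path[1:-1] as drop/take
lemma mid_eq (path : List Int) (h2 : 2 ≤ path.length) :
    PySem.List.slice path (some 1) (some (-1)) = (path.drop 1).take (path.length - 2) := by
  unfold PySem.List.slice PySem.List.clampIdx
  dsimp only
  rw [if_neg (show ¬(1:Int) < 0 by omega), if_pos (show (-1:Int) < 0 by omega),
    if_neg (show ¬((path.length:Int) + (-1) < 0) by omega)]
  have h1 : min (1:Int).toNat path.length = 1 := by simp; omega
  rw [h1]
  congr 1
  omega

-- per-index characterisation of A's 'values' list (Nat indices)
lemma values_getD (path : List Int) (i j : Nat) (h2 : 2 ≤ path.length)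
    (hi : i < path.length - 1) (hj : j < path.length) :
    (((path.drop 1).take (path.length - 2)).take i
      ++ ([path.getD 0 0] ++ [path.getD (path.length - 1) 0])
      ++ ((path.drop 1).take (path.length - 2)).drop i).getD j 0
    = if j = i then path.getD 0 0
      else if j = i + 1 then path.getD (path.length - 1) 0
      else if j < i then path.getD (j + 1) 0
      else path.getD (j - 1) 0 := by
  set t := (path.drop 1).take (path.length - 2) with htdef
  have ht : t.length = path.length - 2 := by
    rw [htdef, List.length_take, List.length_drop]; omega
  have hget : ∀ k : Nat, k < path.length - 2 → t.getD k 0 = path.getD (k + 1) 0 := by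
    intro k hk
    rw [htdef]
    simp only [List.getD_eq_getElem?_getD, List.getElem?_take, List.getElem?_drop]
    rw [if_pos hk, Nat.add_comm]
  have l1 : (t.take i).length = i := by rw [List.length_take]; omega
  simp only [List.singleton_append, List.getD_eq_getElem?_getD, List.getElem?_append,
    List.length_append, l1, List.length_cons, List.length_nil]
  by_cases hji : j < i
  · rw [if_pos (by omega), if_pos (by omega)]
    rw [List.getElem?_take, if_pos hji]
    rw [if_neg (by omega), if_neg (by omega), if_pos hji]
    have := hget j (by omega)
    simpa [List.getD_eq_getElem?_getD, htdef] using this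
  · by_cases he1 : j = i
    · rw [if_pos (by omega), if_neg (by omega)]
      subst he1
      simp
    · by_cases he2 : j = i + 1
      · rw [if_pos (by omega), if_neg (by omega)]
        subst he2
        simp
      · rw [if_neg (by omega), List.getElem?_drop]
        rw [if_neg he1, if_neg he2, if_neg hji]
        have harith : i + (j - (i + 1 + 1)) = j - 2 := by omega
        rw [harith]
        have := hget (j - 2) (by omega)
        have hj2 : j - 2 + 1 = j - 1 := by omega
        rw [hj2] at this
        simpa [List.getD_eq_getElem?_getD, htdef] using this

-- Int-index version, in the ports' vocabulary
lemma values_get (path : List Int) (i j : Int) (h2 : 2 ≤ path.length)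
    (hi0 : 0 ≤ i) (hin : i < (path.length : Int) - 1)
    (hj0 : 0 ≤ j) (hjn : j < (path.length : Int)) :
    PySem.List.pyGetD (((path.drop 1).take (path.length - 2)).take i.toNat
      ++ ([PySem.List.pyGetD path 0 0] ++ [PySem.List.pyGetD path (-1) 0])
      ++ ((path.drop 1).take (path.length - 2)).drop i.toNat) j 0
    = if j = i then PySem.List.pyGetD path 0 0
      else if j = i + 1 then PySem.List.pyGetD path (-1) 0
      else if j < i then PySem.List.pyGetD path (j + 1) 0
      else PySem.List.pyGetD path (j - 1) 0 := by
  have hne : path ≠ [] := by intro h; rw [h] at h2; simp at h2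
  have e0 : PySem.List.pyGetD path 0 0 = path.getD 0 0 := PySem.List.pyGetD_zero path 0
  have elast : PySem.List.pyGetD path (-1) 0 = path.getD (path.length - 1) 0 := by
    rw [PySem.List.pyGetD_neg_one path 0 hne, List.getLast_eq_getElem,
      ← List.getD_eq_getElem path 0 (by omega)]
  rw [show j = ((j.toNat : Nat) : Int) from (Int.toNat_of_nonneg hj0).symm,
    PySem.List.pyGetD_natCast, e0, elast,
    values_getD path i.toNat j.toNat h2 (by omega) (by omega)]
  split_ifs <;>
    first
      | omega
      | rfl
      | rw [show ((j.toNat : Int) + 1) = (((j.toNat + 1 : Nat)) : Int) by omega,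
          PySem.List.pyGetD_natCast]
      | rw [show ((j.toNat : Int) - 1) = (((j.toNat - 1 : Nat)) : Int) by omega,
          PySem.List.pyGetD_natCast]

-- ===== VERDICT (by name: the statement is the Claim_ definition above) =====
theorem map_list_spec : Claim_equal_map_list := by
  intro path _ hpre
  unfold Spec_map_list map_list map_list_alt
  dsimp only
  by_cases h2 : 2 ≤ path.length
  · refine PySem.List.foldl_congr_mem _ _ _ _ ?_
    intro acc i hi
    obtain ⟨hi0, hin⟩ := PySem.List.mem_pyRange_one.1 hi
    congr 2
    rw [PySem.List.enumerate_eq_map_pyRange path 0, List.foldl_map]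
    have hlen : PySem.List.len path = (path.length : Int) := by
      simp [PySem.List.len]
    rw [hlen]
    congr 1
    refine PySem.List.foldl_congr_mem _ _ _ _ ?_
    intro d j hj
    obtain ⟨hj0, hjn⟩ := PySem.List.mem_pyRange_one.1 hj
    dsimp only
    congr 1
    rw [mid_eq path h2, PySem.List.slice_to _ hi0, PySem.List.slice_from _ hi0]
    exact values_get path i j h2 hi0 hin hj0 hjn
  · have h0 : 0 < path.length := List.length_pos_of_ne_nil hpre
    have hr : PySem.List.pyRange 0 ((path.length : Int) - 1) = [] :=
      PySem.List.pyRange_one_eq_nil (by omega)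
    rw [hr]
    rfl
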